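-- pv_equiv track=rewrite | github.com/fajardogomez/dowgraphs | dow.py | minimum_chars
-- ===== SOURCE A (Python) =====
-- import string
--
-- def minimum_chars(char_list):
--     """
--     Finds the least value characters equivalent to those in the given list.
--     """
--     integers = list()
--     upper = list()
--     lower = list()
--     for x in char_list:
--         if x.isdigit():
--             integers.append(x)
--         elif x.isupper():
--             upper.append(x)
--         elif x.islower():
--             lower.append(x)
--     ord_ints = [str(i+1) for i in range(len(integers))]
--     ord_ups = [x for x in string.ascii_uppercase[0:len(upper)]]
--     ord_lows = [x for x in string.ascii_lowercase[0:len(lower)]]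
--     pairs = {k:v for (k,v) in zip(integers + upper + lower, ord_ints + ord_ups + ord_lows)}
--     return [pairs[x] for x in char_list]
-- ===== SOURCE B (Python) =====
-- import string
--
-- def minimum_chars(char_list):
--     """
--     Finds the least value characters equivalent to those in the given list.
--     """
--     mapping = {}
--     ni = nu = nl = 0
--     for x in char_list:
--         if x.isdigit():
--             mapping[x] = str(ni + 1)
--             ni += 1
--         elif x.isupper():
--             mapping[x] = string.ascii_uppercase[nu]
--             nu += 1
--         elif x.islower():
--             mapping[x] = string.ascii_lowercase[nl]
--             nl += 1
--     return [mapping[x] for x in char_list]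
-- ===== Notes on version B (the rewrite author's own statement) =====
-- stated objective: simpler
-- what changed: Single pass with three category counters writing labels straight into the dict, replacing A's three partition lists, three ordinal-label lists, concatenation, zip and dict comprehension.
import Mathlib
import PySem

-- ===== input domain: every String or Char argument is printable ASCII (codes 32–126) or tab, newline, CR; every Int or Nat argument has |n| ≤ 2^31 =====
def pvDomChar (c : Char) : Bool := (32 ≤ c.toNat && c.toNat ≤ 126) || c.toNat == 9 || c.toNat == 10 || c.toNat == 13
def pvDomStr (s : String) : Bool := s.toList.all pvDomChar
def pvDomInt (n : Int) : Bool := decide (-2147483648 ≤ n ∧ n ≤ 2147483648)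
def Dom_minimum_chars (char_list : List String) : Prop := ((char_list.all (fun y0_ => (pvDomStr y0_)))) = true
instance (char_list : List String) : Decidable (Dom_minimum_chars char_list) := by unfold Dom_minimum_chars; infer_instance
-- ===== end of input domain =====

-- B replaces A's three partition lists + three ordinal-label lists + zip + dict comprehension by one
-- pass with three category counters writing labels straight into the dict (return value only; neither mutates).

-- string.ascii_uppercase / string.ascii_lowercase (constants from the 'string' module)
def pvUpperChars : List Char :=
  ['A','B','C','D','E','F','G','H','I','J','K','L','M','N','O','P','Q','R','S','T','U','V','W','X','Y','Z']
def pvLowerChars : List Char :=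
  ['a','b','c','d','e','f','g','h','i','j','k','l','m','n','o','p','q','r','s','t','u','v','w','x','y','z']

-- hand port of str.isupper / str.islower (PySem has no string-level form): at least one cased
-- character and no cased character of the other case; exact on the ASCII domain, where cased = alphabetic.
def pvIsupper (s : String) : Bool :=
  s.toList.any PySem.Chars.isalpha && s.toList.all (fun c => !(PySem.Chars.islower c))
def pvIslower (s : String) : Bool :=
  s.toList.any PySem.Chars.isalpha && s.toList.all (fun c => !(PySem.Chars.isupper c))

-- ===== PORT A =====
-- the body of A's for-loop building integers / upper / lower (three appends over one traversal)
def pvStepA (acc : List String × List String × List String) (x : String) :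
    List String × List String × List String :=
  if PySem.Str.strIsdigit x then (acc.1 ++ [x], acc.2.1, acc.2.2)
  else if pvIsupper x then (acc.1, acc.2.1 ++ [x], acc.2.2)
  else if pvIslower x then (acc.1, acc.2.1, acc.2.2 ++ [x])
  else acc

def pvPartitionA (char_list : List String) : List String × List String × List String :=
  char_list.foldl pvStepA ([], [], [])

def minimum_chars (char_list : List String) : List String :=
  let p := pvPartitionA char_list
  let integers := p.1
  let upper := p.2.1
  let lower := p.2.2
  let ord_ints := (List.range integers.length).map (fun i => PySem.Int.toStr ((i : Int) + 1))
  -- [x for x in string.ascii_uppercase[0:len(upper)]] : the slice [0:n] of the constant is take n over its chars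
  let ord_ups := (pvUpperChars.take upper.length).map (fun c => String.ofList [c])
  let ord_lows := (pvLowerChars.take lower.length).map (fun c => String.ofList [c])
  let pairs := ((integers ++ upper ++ lower).zip (ord_ints ++ ord_ups ++ ord_lows)).foldl
    (fun (d : PySem.Dict String String) kv => d.insert kv.1 kv.2) PySem.Dict.empty
  -- pairs[x]: KeyError when x is in no category (excluded by Pre_)
  char_list.map (fun x => pairs.getD x "")

-- ===== PORT B =====
-- one step of B's single pass: state = (mapping, ni, nu, nl)
def pvStepB (st : PySem.Dict String String × Nat × Nat × Nat) (x : String) :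
    PySem.Dict String String × Nat × Nat × Nat :=
  if PySem.Str.strIsdigit x then
    (st.1.insert x (PySem.Int.toStr ((st.2.1 : Int) + 1)), st.2.1 + 1, st.2.2.1, st.2.2.2)
  else if pvIsupper x then
    -- string.ascii_uppercase[nu]: IndexError when nu ≥ 26 (excluded by Pre_)
    (st.1.insert x (String.ofList [PySem.List.pyGetD pvUpperChars (st.2.2.1 : Int) ' ']), st.2.1, st.2.2.1 + 1, st.2.2.2)
  else if pvIslower x then
    (st.1.insert x (String.ofList [PySem.List.pyGetD pvLowerChars (st.2.2.2 : Int) ' ']), st.2.1, st.2.2.1, st.2.2.2 + 1)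
  else st

def minimum_chars_alt (char_list : List String) : List String :=
  let st := char_list.foldl pvStepB (PySem.Dict.empty, 0, 0, 0)
  -- mapping[x]: KeyError when x is in no category (excluded by Pre_)
  char_list.map (fun x => st.1.getD x "")

-- ===== PRECONDITION & SPEC =====
-- the category of an element, following A's if-chain
def pvCatD (x : String) : Bool := PySem.Str.strIsdigit x
def pvCatU (x : String) : Bool := !PySem.Str.strIsdigit x && pvIsupper x
def pvCatL (x : String) : Bool := !PySem.Str.strIsdigit x && !pvIsupper x && pvIslower x

-- Pre_ excludes (a) lists with an element in no category (A raises KeyError), and (b) lists with more than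
-- 26 upper- or lower-category elements, where A's zip silently truncates (KeyError, or an accidental value
-- when the excess elements are duplicates) and B raises IndexError.
def Pre_minimum_chars (char_list : List String) : Prop :=
  (∀ x ∈ char_list, (pvCatD x || pvCatU x || pvCatL x) = true) ∧
  (char_list.filter pvCatU).length ≤ 26 ∧ (char_list.filter pvCatL).length ≤ 26
instance (char_list : List String) : Decidable (Pre_minimum_chars char_list) := by
  unfold Pre_minimum_chars; infer_instance

def pvWitness_minimum_chars : List String := ["b", "3", "A", "b", "Z", "7"]

def Spec_minimum_chars (char_list : List String) (out : List String) : Prop :=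
  out = minimum_chars_alt char_list
instance (char_list : List String) (out : List String) : Decidable (Spec_minimum_chars char_list out) := by
  unfold Spec_minimum_chars; infer_instance

-- ===== CLAIM (what is proved, stated in full; the proofs are below) =====
def Claim_equal_minimum_chars : Prop := ∀ (char_list : List String), Dom_minimum_chars char_list →
  Pre_minimum_chars char_list → Spec_minimum_chars char_list (minimum_chars char_list)

-- ===== LEMMAS AND PROOFS =====

-- proof-side names for the two loop results
def pvInsFold (l : List (String × String)) (d : PySem.Dict String String) : PySem.Dict String String :=
  l.foldl (fun d kv => d.insert kv.1 kv.2) d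

def pvLabelsD (n : Nat) : List String := (List.range n).map (fun i => PySem.Int.toStr ((i : Int) + 1))
def pvLabelsU (n : Nat) : List String := (pvUpperChars.take n).map (fun c => String.ofList [c])
def pvLabelsL (n : Nat) : List String := (pvLowerChars.take n).map (fun c => String.ofList [c])

def pvPairsA (cl : List String) : List (String × String) :=
  ((cl.filter pvCatD) ++ (cl.filter pvCatU) ++ (cl.filter pvCatL)).zip
    (pvLabelsD (cl.filter pvCatD).length ++ pvLabelsU (cl.filter pvCatU).length ++ pvLabelsL (cl.filter pvCatL).length)

def pvStB (cl : List String) : PySem.Dict String String × Nat × Nat × Nat :=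
  cl.foldl pvStepB (PySem.Dict.empty, 0, 0, 0)

lemma pvPartitionA_eq (cl : List String) :
    ∀ a b c : List String,
      cl.foldl pvStepA (a, b, c)
      = (a ++ cl.filter pvCatD, b ++ cl.filter pvCatU, c ++ cl.filter pvCatL) := by
  induction cl with
  | nil => intro a b c; simp
  | cons x t ih =>
    intro a b c
    simp only [List.foldl_cons]
    by_cases hd : PySem.Chars.strIsdigit x.toList = true
    · have hstep : pvStepA (a, b, c) x = (a ++ [x], b, c) := by simp [pvStepA, hd]
      have cD : pvCatD x = true := hd
      have cU : pvCatU x = false := by simp [pvCatU, hd]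
      have cL : pvCatL x = false := by simp [pvCatL, hd]
      rw [hstep, ih]
      simp [cD, cU, cL]
    · by_cases hu : pvIsupper x = true
      · have hstep : pvStepA (a, b, c) x = (a, b ++ [x], c) := by simp [pvStepA, hd, hu]
        have cD : pvCatD x = false := by simp [pvCatD, hd]
        have cU : pvCatU x = true := by simp [pvCatU, hd, hu]
        have cL : pvCatL x = false := by simp [pvCatL, hu]
        rw [hstep, ih]
        simp [cD, cU, cL]
      · by_cases hl : pvIslower x = true
        · have hstep : pvStepA (a, b, c) x = (a, b, c ++ [x]) := by simp [pvStepA, hd, hu, hl]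
          have cD : pvCatD x = false := by simp [pvCatD, hd]
          have cU : pvCatU x = false := by simp [pvCatU, hu]
          have cL : pvCatL x = true := by simp [pvCatL, hd, hu, hl]
          rw [hstep, ih]
          simp [cD, cU, cL]
        · have hstep : pvStepA (a, b, c) x = (a, b, c) := by simp [pvStepA, hd, hu, hl]
          have cD : pvCatD x = false := by simp [pvCatD, hd]
          have cU : pvCatU x = false := by simp [pvCatU, hu]
          have cL : pvCatL x = false := by simp [pvCatL, hl]
          rw [hstep, ih]
          simp [cD, cU, cL]

lemma pvA_eq (cl : List String) :
    minimum_chars cl = cl.map (fun x => (pvInsFold (pvPairsA cl) PySem.Dict.empty).getD x "") := by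
  have h := pvPartitionA_eq cl [] [] []
  simp only [List.nil_append] at h
  simp [minimum_chars, pvPartitionA, h, pvInsFold, pvPairsA, pvLabelsD, pvLabelsU, pvLabelsL]

lemma pvB_eq (cl : List String) :
    minimum_chars_alt cl = cl.map (fun x => (pvStB cl).1.getD x "") := rfl

-- two dicts that agree on every getD still agree after the same insert loop
lemma pvInsFold_congr (l : List (String × String)) :
    ∀ d d' : PySem.Dict String String, (∀ q, d.getD q "" = d'.getD q "") →
      ∀ q, (pvInsFold l d).getD q "" = (pvInsFold l d').getD q "" := by
  induction l with
  | nil => intro d d' h q; exact h q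
  | cons p t ih =>
    intro d d' h q
    refine ih _ _ (fun r => ?_) q
    rw [PySem.Dict.getD_insert, PySem.Dict.getD_insert]
    split_ifs with hr
    · rfl
    · exact h r

-- an insert commutes (getD-wise) past an insert loop whose keys all differ from it
lemma pvInsFold_comm (l : List (String × String)) (k v : String) (h : ∀ p ∈ l, p.1 ≠ k) :
    ∀ (d : PySem.Dict String String) q,
      (pvInsFold l (d.insert k v)).getD q "" = ((pvInsFold l d).insert k v).getD q "" := by
  induction l with
  | nil => intro d q; rfl
  | cons p t ih =>
    intro d q
    have hpk : p.1 ≠ k := h p (List.mem_cons_self)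
    have step : ∀ r, ((d.insert k v).insert p.1 p.2).getD r "" = ((d.insert p.1 p.2).insert k v).getD r "" := by
      intro r
      exact PySem.Dict.getD_insert_insert_comm d v p.2 (Ne.symm hpk) r ""
    calc (pvInsFold (p :: t) (d.insert k v)).getD q ""
        = (pvInsFold t ((d.insert k v).insert p.1 p.2)).getD q "" := rfl
      _ = (pvInsFold t ((d.insert p.1 p.2).insert k v)).getD q "" := pvInsFold_congr t _ _ step q
      _ = ((pvInsFold t (d.insert p.1 p.2)).insert k v).getD q "" :=
          ih (fun p hp => h p (List.mem_cons_of_mem _ hp)) _ q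

lemma pvZip_fst_mem {ks vs : List String} {p : String × String} (hp : p ∈ ks.zip vs) : p.1 ∈ ks :=
  (List.of_mem_zip hp).1

-- the three category predicates are mutually exclusive (by the if-chain shape)
lemma pvCat_excl_DU {x y : String} (hx : pvCatD x = true) (hy : pvCatU y = true) : y ≠ x := by
  intro h; subst h; simp [pvCatD, pvCatU] at hx hy; simp [hx] at hy
lemma pvCat_excl_DL {x y : String} (hx : pvCatD x = true) (hy : pvCatL y = true) : y ≠ x := by
  intro h; subst h; simp [pvCatD, pvCatL] at hx hy; simp [hx] at hy
lemma pvCat_excl_UL {x y : String} (hx : pvCatU x = true) (hy : pvCatL y = true) : y ≠ x := by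
  intro h; subst h; simp_all [pvCatU, pvCatL]

lemma pvLabelsD_len (n : Nat) : (pvLabelsD n).length = n := by simp [pvLabelsD]
lemma pvLabelsU_len (n : Nat) (h : n ≤ 26) : (pvLabelsU n).length = n := by
  have h26 : pvUpperChars.length = 26 := rfl
  simp only [pvLabelsU, List.length_map, List.length_take, h26]
  omega
lemma pvLabelsL_len (n : Nat) (h : n ≤ 26) : (pvLabelsL n).length = n := by
  have h26 : pvLowerChars.length = 26 := rfl
  simp only [pvLabelsL, List.length_map, List.length_take, h26]
  omega

lemma pvLabelsD_snoc (n : Nat) :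
    pvLabelsD (n + 1) = pvLabelsD n ++ [PySem.Int.toStr ((n : Int) + 1)] := by
  simp [pvLabelsD, List.range_succ]

lemma pvLabelsU_snoc (n : Nat) (h : n < 26) :
    pvLabelsU (n + 1) = pvLabelsU n ++ [String.ofList [PySem.List.pyGetD pvUpperChars (n : Int) ' ']] := by
  have hlen : n < pvUpperChars.length := by simp [pvUpperChars]; omega
  have hget : PySem.List.pyGetD pvUpperChars (n : Int) ' ' = pvUpperChars[n] := by
    rw [PySem.List.pyGetD_natCast]
    simp [List.getD, List.getElem?_eq_getElem hlen]
  simp only [pvLabelsU, List.take_succ, List.getElem?_eq_getElem hlen, Option.toList_some,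
    List.map_append, List.map_cons, List.map_nil, hget]

lemma pvLabelsL_snoc (n : Nat) (h : n < 26) :
    pvLabelsL (n + 1) = pvLabelsL n ++ [String.ofList [PySem.List.pyGetD pvLowerChars (n : Int) ' ']] := by
  have hlen : n < pvLowerChars.length := by simp [pvLowerChars]; omega
  have hget : PySem.List.pyGetD pvLowerChars (n : Int) ' ' = pvLowerChars[n] := by
    rw [PySem.List.pyGetD_natCast]
    simp [List.getD, List.getElem?_eq_getElem hlen]
  simp only [pvLabelsL, List.take_succ, List.getElem?_eq_getElem hlen, Option.toList_some,
    List.map_append, List.map_cons, List.map_nil, hget]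

lemma pvInsFold_append (l1 l2 : List (String × String)) (d : PySem.Dict String String) :
    pvInsFold (l1 ++ l2) d = pvInsFold l2 (pvInsFold l1 d) := by
  simp [pvInsFold, List.foldl_append]

lemma pvZip3 {α β : Type} (a b c : List α) (d e f : List β)
    (h1 : a.length = d.length) (h2 : b.length = e.length) :
    (a ++ b ++ c).zip (d ++ e ++ f) = a.zip d ++ b.zip e ++ c.zip f := by
  rw [List.append_assoc, List.append_assoc, List.zip_append h1, List.zip_append h2]
  exact (List.append_assoc _ _ _).symm

def pvZD (cl : List String) : List (String × String) :=
  (cl.filter pvCatD).zip (pvLabelsD (cl.filter pvCatD).length)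
def pvZU (cl : List String) : List (String × String) :=
  (cl.filter pvCatU).zip (pvLabelsU (cl.filter pvCatU).length)
def pvZL (cl : List String) : List (String × String) :=
  (cl.filter pvCatL).zip (pvLabelsL (cl.filter pvCatL).length)

lemma pvPairsA_eq (cl : List String) (hU : (cl.filter pvCatU).length ≤ 26) :
    pvPairsA cl = pvZD cl ++ pvZU cl ++ pvZL cl := by
  unfold pvPairsA pvZD pvZU pvZL
  rw [pvZip3 _ _ _ _ _ _ (pvLabelsD_len _).symm (pvLabelsU_len _ hU).symm]

-- the main invariant: B's counters are the category counts, and both dicts agree on every lookup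
lemma pvMain (cl : List String)
    (hU : (cl.filter pvCatU).length ≤ 26) (hL : (cl.filter pvCatL).length ≤ 26) :
    (pvStB cl).2.1 = (cl.filter pvCatD).length ∧
    (pvStB cl).2.2.1 = (cl.filter pvCatU).length ∧
    (pvStB cl).2.2.2 = (cl.filter pvCatL).length ∧
    ∀ q, (pvInsFold (pvPairsA cl) PySem.Dict.empty).getD q "" = (pvStB cl).1.getD q "" := by
  induction cl using List.reverseRecOn with
  | nil => exact ⟨rfl, rfl, rfl, fun q => rfl⟩
  | append_singleton cl y ih =>
    have hUy : ((cl ++ [y]).filter pvCatU).length ≤ 26 := hU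
    have hLy : ((cl ++ [y]).filter pvCatL).length ≤ 26 := hL
    have hU' : (cl.filter pvCatU).length ≤ 26 := by
      rw [List.filter_append, List.length_append] at hUy; omega
    have hL' : (cl.filter pvCatL).length ≤ 26 := by
      rw [List.filter_append, List.length_append] at hLy; omega
    obtain ⟨h1, h2, h3, h4⟩ := ih hU' hL'
    have hstb : pvStB (cl ++ [y]) = pvStepB (pvStB cl) y := by
      simp [pvStB, List.foldl_append]
    have hpairs_cl : pvPairsA cl = pvZD cl ++ (pvZU cl ++ pvZL cl) := by
      rw [pvPairsA_eq cl hU', List.append_assoc]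
    by_cases hd : PySem.Chars.strIsdigit y.toList = true
    · -- digit step
      have cD : pvCatD y = true := hd
      have cU : pvCatU y = false := by simp [pvCatU, hd]
      have cL : pvCatL y = false := by simp [pvCatL, hd]
      have hfD : (cl ++ [y]).filter pvCatD = cl.filter pvCatD ++ [y] := by
        simp [List.filter_append, cD]
      have hfU : (cl ++ [y]).filter pvCatU = cl.filter pvCatU := by
        simp [List.filter_append, cU]
      have hfL : (cl ++ [y]).filter pvCatL = cl.filter pvCatL := by
        simp [List.filter_append, cL]
      have hstep : pvStB (cl ++ [y]) =
          ((pvStB cl).1.insert y (PySem.Int.toStr (((pvStB cl).2.1 : Int) + 1)),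
            (pvStB cl).2.1 + 1, (pvStB cl).2.2.1, (pvStB cl).2.2.2) := by
        rw [hstb]; simp [pvStepB, hd]
      have hdisj : ∀ p ∈ pvZU cl ++ pvZL cl, p.1 ≠ y := by
        intro p hp
        rcases List.mem_append.1 hp with h | h
        · exact pvCat_excl_DU cD (List.mem_filter.1 (pvZip_fst_mem h)).2
        · exact pvCat_excl_DL cD (List.mem_filter.1 (pvZip_fst_mem h)).2
      have e1 : pvPairsA (cl ++ [y]) =
          pvZD cl ++ ([(y, PySem.Int.toStr (((cl.filter pvCatD).length : Int) + 1))] ++ (pvZU cl ++ pvZL cl)) := by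
        unfold pvPairsA pvZD pvZU pvZL
        rw [hfD, hfU, hfL]
        have hlen : (cl.filter pvCatD ++ [y]).length = (cl.filter pvCatD).length + 1 := by
          simp
        rw [hlen, pvLabelsD_snoc,
          pvZip3 _ _ _ _ _ _ (by simp [pvLabelsD_len]) (pvLabelsU_len _ hU').symm,
          List.zip_append (pvLabelsD_len _).symm]
        simp [List.append_assoc]
      have hA : ∀ q, (pvInsFold (pvPairsA (cl ++ [y])) PySem.Dict.empty).getD q "" =
          ((pvInsFold (pvPairsA cl) PySem.Dict.empty).insert y
            (PySem.Int.toStr (((cl.filter pvCatD).length : Int) + 1))).getD q "" := by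
        intro q
        rw [e1, pvInsFold_append, pvInsFold_append,
          show ∀ d, pvInsFold [(y, PySem.Int.toStr (((cl.filter pvCatD).length : Int) + 1))] d
            = d.insert y (PySem.Int.toStr (((cl.filter pvCatD).length : Int) + 1)) from fun d => rfl,
          pvInsFold_comm _ _ _ hdisj]
        simp [hpairs_cl, pvInsFold_append]
      refine ⟨?_, ?_, ?_, ?_⟩
      · rw [hstep]; simp [hfD, h1]
      · rw [hstep]; simp [hfU, h2]
      · rw [hstep]; simp [hfL, h3]
      · intro q
        rw [hA q, hstep]
        simp only [PySem.Dict.getD_insert, h1]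
        split_ifs with hq
        · rfl
        · exact h4 q
    · by_cases hu : pvIsupper y = true
      · -- uppercase step
        have cD : pvCatD y = false := by simp [pvCatD, hd]
        have cU : pvCatU y = true := by simp [pvCatU, hd, hu]
        have cL : pvCatL y = false := by simp [pvCatL, hu]
        have hnU : (cl.filter pvCatU).length < 26 := by
          rw [List.filter_append] at hUy; simp [cU] at hUy; omega
        have hfD : (cl ++ [y]).filter pvCatD = cl.filter pvCatD := by
          simp [List.filter_append, cD]
        have hfU : (cl ++ [y]).filter pvCatU = cl.filter pvCatU ++ [y] := by
          simp [List.filter_append, cU]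
        have hfL : (cl ++ [y]).filter pvCatL = cl.filter pvCatL := by
          simp [List.filter_append, cL]
        have hstep : pvStB (cl ++ [y]) =
            ((pvStB cl).1.insert y (String.ofList [PySem.List.pyGetD pvUpperChars ((pvStB cl).2.2.1 : Int) ' ']),
              (pvStB cl).2.1, (pvStB cl).2.2.1 + 1, (pvStB cl).2.2.2) := by
          rw [hstb]; simp [pvStepB, hd, hu]
        have hdisj : ∀ p ∈ pvZL cl, p.1 ≠ y := by
          intro p hp
          exact pvCat_excl_UL cU (List.mem_filter.1 (pvZip_fst_mem hp)).2
        have e1 : pvPairsA (cl ++ [y]) =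
            (pvZD cl ++ pvZU cl) ++ ([(y, String.ofList [PySem.List.pyGetD pvUpperChars (((cl.filter pvCatU).length : Int)) ' '])] ++ pvZL cl) := by
          unfold pvPairsA pvZD pvZU pvZL
          rw [hfD, hfU, hfL]
          have hlen : (cl.filter pvCatU ++ [y]).length = (cl.filter pvCatU).length + 1 := by
            simp
          rw [hlen, pvLabelsU_snoc _ hnU,
            pvZip3 _ _ _ _ _ _ (pvLabelsD_len _).symm
              (by simp [pvLabelsU_len _ hU']),
            List.zip_append (pvLabelsU_len _ hU').symm]
          simp [List.append_assoc]
        have hA : ∀ q, (pvInsFold (pvPairsA (cl ++ [y])) PySem.Dict.empty).getD q "" =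
            ((pvInsFold (pvPairsA cl) PySem.Dict.empty).insert y
              (String.ofList [PySem.List.pyGetD pvUpperChars (((cl.filter pvCatU).length : Int)) ' '])).getD q "" := by
          intro q
          rw [e1, pvInsFold_append, pvInsFold_append,
            show ∀ d, pvInsFold [(y, String.ofList [PySem.List.pyGetD pvUpperChars (((cl.filter pvCatU).length : Int)) ' '])] d
              = d.insert y (String.ofList [PySem.List.pyGetD pvUpperChars (((cl.filter pvCatU).length : Int)) ' ']) from fun d => rfl,
            pvInsFold_comm _ _ _ hdisj]
          simp [pvPairsA_eq cl hU', pvInsFold_append]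
        refine ⟨?_, ?_, ?_, ?_⟩
        · rw [hstep]; simp [hfD, h1]
        · rw [hstep]; simp [hfU, h2]
        · rw [hstep]; simp [hfL, h3]
        · intro q
          rw [hA q, hstep]
          simp only [PySem.Dict.getD_insert, h2]
          split_ifs with hq
          · rfl
          · exact h4 q
      · by_cases hl : pvIslower y = true
        · -- lowercase step
          have cD : pvCatD y = false := by simp [pvCatD, hd]
          have cU : pvCatU y = false := by simp [pvCatU, hu]
          have cL : pvCatL y = true := by simp [pvCatL, hd, hu, hl]
          have hnL : (cl.filter pvCatL).length < 26 := by
            rw [List.filter_append] at hLy; simp [cL] at hLy; omega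
          have hfD : (cl ++ [y]).filter pvCatD = cl.filter pvCatD := by
            simp [List.filter_append, cD]
          have hfU : (cl ++ [y]).filter pvCatU = cl.filter pvCatU := by
            simp [List.filter_append, cU]
          have hfL : (cl ++ [y]).filter pvCatL = cl.filter pvCatL ++ [y] := by
            simp [List.filter_append, cL]
          have hstep : pvStB (cl ++ [y]) =
              ((pvStB cl).1.insert y (String.ofList [PySem.List.pyGetD pvLowerChars ((pvStB cl).2.2.2 : Int) ' ']),
                (pvStB cl).2.1, (pvStB cl).2.2.1, (pvStB cl).2.2.2 + 1) := by
            rw [hstb]; simp [pvStepB, hd, hu, hl]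
          have e1 : pvPairsA (cl ++ [y]) =
              pvPairsA cl ++ [(y, String.ofList [PySem.List.pyGetD pvLowerChars (((cl.filter pvCatL).length : Int)) ' '])] := by
            rw [pvPairsA_eq cl hU']
            unfold pvPairsA pvZD pvZU pvZL
            rw [hfD, hfU, hfL]
            have hlen : (cl.filter pvCatL ++ [y]).length = (cl.filter pvCatL).length + 1 := by
              simp
            rw [hlen, pvLabelsL_snoc _ hnL,
              pvZip3 _ _ _ _ _ _ (pvLabelsD_len _).symm (pvLabelsU_len _ hU').symm,
              List.zip_append (pvLabelsL_len _ (le_of_lt hnL)).symm]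
            simp [List.append_assoc]
          have hA : pvInsFold (pvPairsA (cl ++ [y])) PySem.Dict.empty =
              (pvInsFold (pvPairsA cl) PySem.Dict.empty).insert y
                (String.ofList [PySem.List.pyGetD pvLowerChars (((cl.filter pvCatL).length : Int)) ' ']) := by
            rw [e1, pvInsFold_append]
            rfl
          refine ⟨?_, ?_, ?_, ?_⟩
          · rw [hstep]; simp [hfD, h1]
          · rw [hstep]; simp [hfU, h2]
          · rw [hstep]; simp [hfL, h3]
          · intro q
            rw [hA, hstep]
            simp only [PySem.Dict.getD_insert, h3]
            split_ifs with hq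
            · rfl
            · exact h4 q
        · -- y is in no category: nothing changes
          have cD : pvCatD y = false := by simp [pvCatD, hd]
          have cU : pvCatU y = false := by simp [pvCatU, hu]
          have cL : pvCatL y = false := by simp [pvCatL, hl]
          have hfD : (cl ++ [y]).filter pvCatD = cl.filter pvCatD := by
            simp [List.filter_append, cD]
          have hfU : (cl ++ [y]).filter pvCatU = cl.filter pvCatU := by
            simp [List.filter_append, cU]
          have hfL : (cl ++ [y]).filter pvCatL = cl.filter pvCatL := by
            simp [List.filter_append, cL]
          have hstep : pvStB (cl ++ [y]) = pvStB cl := by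
            rw [hstb]; simp [pvStepB, hd, hu, hl]
          have e1 : pvPairsA (cl ++ [y]) = pvPairsA cl := by
            unfold pvPairsA
            rw [hfD, hfU, hfL]
          refine ⟨?_, ?_, ?_, ?_⟩
          · rw [hstep, hfD]; exact h1
          · rw [hstep, hfU]; exact h2
          · rw [hstep, hfL]; exact h3
          · intro q
            rw [hstep, e1]; exact h4 q

-- ===== VERDICT (by name: the statement is the Claim_ definition above) =====
theorem minimum_chars_spec : Claim_equal_minimum_chars := by
  intro cl _hdom hpre
  unfold Spec_minimum_chars
  rw [pvA_eq, pvB_eq]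
  have h := (pvMain cl hpre.2.1 hpre.2.2).2.2.2
  exact List.map_congr_left (fun x _ => h x)
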